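-- pv_equiv track=rewrite | github.com/purs3lab/LLMs4GitHubWorkflows | dataProcessing/process_argus_step3.py | find_uses_line_number
-- ===== SOURCE A (Python) =====
-- def find_uses_line_number(yaml, job_id, uses_num, action_name):
--     found_job = False
--     workflow_yaml = yaml.split('\n')
--     jobs_line = 0
--     while not workflow_yaml[jobs_line].startswith('jobs:'):
--         jobs_line += 1
--     for i in range(jobs_line, len(workflow_yaml)):
--         line = workflow_yaml[i].strip()
--         if line.startswith('-'):
--             line = line[1:].strip()
--         if line.startswith('#'):
--             continue
--         if not found_job and line.startswith(job_id + ':'):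
--             found_job = True
--         elif found_job and (line.startswith('uses:') or line.startswith('uses :')):
--             if uses_num == 1 and action_name in line:
--                 return i + 1
--             else:
--                 uses_num -= 1
--     return 0
-- ===== SOURCE B (Python) =====
-- def find_uses_line_number(yaml, job_id, uses_num, action_name):
--     lines = yaml.split('\n')
--     jobs_line = next(i for i, l in enumerate(lines) if l.startswith('jobs:'))
--
--     def clean(s):
--         s = s.strip()
--         return s[1:].strip() if s.startswith('-') else s
--
--     cleaned = [(i, clean(l)) for i, l in enumerate(lines)][jobs_line:]
--     visible = [(i, l) for i, l in cleaned if not l.startswith('#')]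
--     header = job_id + ':'
--     k = next((p for p, (_, l) in enumerate(visible) if l.startswith(header)),
--              len(visible))
--     uses = [(i, l) for i, l in visible[k + 1:]
--             if l.startswith('uses:') or l.startswith('uses :')]
--     if 1 <= uses_num <= len(uses):
--         i, line = uses[uses_num - 1]
--         return i + 1 if action_name in line else 0
--     return 0
-- ===== Notes on version B (the rewrite author's own statement) =====
-- stated objective: alternative
-- what changed: Replaces A's single stateful scan (found-job flag plus a mutable uses_num countdown decremented at every non-matching uses line) by staged list passes: enumerate+clean all lines, filter out comments, locate the job header by index search, slice past it, filter the uses lines into a list, and directly index its (uses_num-1)-th entry.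
import Mathlib
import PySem

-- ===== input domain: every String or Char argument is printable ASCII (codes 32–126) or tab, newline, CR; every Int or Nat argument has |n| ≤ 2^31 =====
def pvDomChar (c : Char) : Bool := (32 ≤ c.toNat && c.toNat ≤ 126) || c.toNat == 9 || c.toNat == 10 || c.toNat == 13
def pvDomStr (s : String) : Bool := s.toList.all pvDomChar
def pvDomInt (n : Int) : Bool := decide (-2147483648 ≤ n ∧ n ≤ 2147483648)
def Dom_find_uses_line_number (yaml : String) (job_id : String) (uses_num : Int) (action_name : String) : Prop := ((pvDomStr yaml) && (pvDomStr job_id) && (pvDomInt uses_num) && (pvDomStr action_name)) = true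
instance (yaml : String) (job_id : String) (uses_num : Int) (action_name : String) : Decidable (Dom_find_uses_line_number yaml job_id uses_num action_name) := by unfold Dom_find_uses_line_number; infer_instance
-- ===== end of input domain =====

-- B replaces A's single stateful scan (found-flag + mutable uses_num countdown) by staged list
-- pipeline passes (enumerate/map/filter/findIdx/drop/index); same values everywhere A returns (objective: simpler).

-- ===== PORT A =====
-- yaml.split('\n'); sep is the nonempty literal "\n", so split? is always some
def pvSplitLines (yaml : String) : List String := (PySem.Str.split? yaml "\n").getD []

-- A's initial `while` loop (none = the loop runs off the end: Python raises IndexError; excluded by Pre_)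
def pvJobsIdx : List String → Nat → Option Nat
  | [], _ => none
  | l :: rest, i =>
    if PySem.Str.startswith l "jobs:" then some i else pvJobsIdx rest (i + 1)

-- A's per-line cleanup: strip, then drop a leading '-' and strip again
def pvCleanLine (l : String) : String :=
  let line := PySem.Str.strip l
  if PySem.Str.startswith line "-" then PySem.Str.strip (PySem.Str.slice line (some 1) none) else line

-- A's for-loop: scans with flag found and the mutated counter n
def pvLoopA : List String → Int → Bool → Int → String → String → Int
  | [], _, _, _, _, _ => 0
  | l :: rest, i, found, n, job, act =>
    let line := pvCleanLine l
    if PySem.Str.startswith line "#" then pvLoopA rest (i + 1) found n job act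
    else if !found then
      if PySem.Str.startswith line (job ++ ":") then pvLoopA rest (i + 1) true n job act
      else pvLoopA rest (i + 1) false n job act
    else if PySem.Str.startswith line "uses:" || PySem.Str.startswith line "uses :" then
      if n = 1 ∧ PySem.Str.isIn act line = true then i + 1
      else pvLoopA rest (i + 1) true (n - 1) job act
    else pvLoopA rest (i + 1) true n job act

def find_uses_line_number (yaml : String) (job_id : String) (uses_num : Int) (action_name : String) : Int :=
  let ws := pvSplitLines yaml
  match pvJobsIdx ws 0 with
  | none => 0  -- Python A raises IndexError here; outside Pre_
  | some j => pvLoopA (ws.drop j) (j : Int) false uses_num job_id action_name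

-- ===== PORT B =====
-- B's clean(s) helper
def pvCleanB (s : String) : String :=
  let t := PySem.Str.strip s
  if PySem.Str.startswith t "-" then PySem.Str.strip (PySem.Str.slice t (some 1) none) else t

-- B's final selection: index the uses list at uses_num-1 and test the action name
def pvPickB (es : List (Int × String)) (n : Int) (act : String) : Int :=
  if 1 ≤ n ∧ n ≤ (es.length : Int) then
    let p := es.getD (n - 1).toNat (0, "")
    if PySem.Str.isIn act p.2 then p.1 + 1 else 0
  else 0

def find_uses_line_number_alt (yaml : String) (job_id : String) (uses_num : Int) (action_name : String) : Int :=
  let ls := (PySem.Str.split? yaml "\n").getD []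
  match ls.findIdx? (fun l => PySem.Str.startswith l "jobs:") with
  | none => 0  -- Python B raises StopIteration here; outside Pre_
  | some j =>
    let cleaned := ((PySem.List.enumerate ls 0).map (fun p => (p.1, pvCleanB p.2))).drop j
    let visible := cleaned.filter (fun p => !PySem.Str.startswith p.2 "#")
    let header := job_id ++ ":"
    let k := visible.findIdx (fun p => PySem.Str.startswith p.2 header)
    let uses := (visible.drop (k + 1)).filter
      (fun p => PySem.Str.startswith p.2 "uses:" || PySem.Str.startswith p.2 "uses :")
    pvPickB uses uses_num action_name

-- ===== PRECONDITION & SPEC =====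
-- Pre_ excludes exactly the inputs on which both Pythons raise (A IndexError, B StopIteration): no line of yaml starts with "jobs:".
def Pre_find_uses_line_number (yaml : String) (job_id : String) (uses_num : Int) (action_name : String) : Prop :=
  (pvSplitLines yaml).any (fun l => PySem.Str.startswith l "jobs:") = true
instance (yaml : String) (job_id : String) (uses_num : Int) (action_name : String) : Decidable (Pre_find_uses_line_number yaml job_id uses_num action_name) := by unfold Pre_find_uses_line_number; infer_instance

def pvWitness_find_uses_line_number : String × String × Int × String :=
  ("jobs:\n build:\n  - uses: a/b@v1", "build", 1, "a/b")

def Spec_find_uses_line_number (yaml : String) (job_id : String) (uses_num : Int) (action_name : String) (out : Int) : Prop := out = find_uses_line_number_alt yaml job_id uses_num action_name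
instance (yaml : String) (job_id : String) (uses_num : Int) (action_name : String) (out : Int) : Decidable (Spec_find_uses_line_number yaml job_id uses_num action_name out) := by unfold Spec_find_uses_line_number; infer_instance

-- ===== CLAIM (what is proved, stated in full; the proofs are below) =====
def Claim_equal_find_uses_line_number : Prop := ∀ (yaml : String) (job_id : String) (uses_num : Int) (action_name : String), Dom_find_uses_line_number yaml job_id uses_num action_name → Pre_find_uses_line_number yaml job_id uses_num action_name → Spec_find_uses_line_number yaml job_id uses_num action_name (find_uses_line_number yaml job_id uses_num action_name)

-- ===== LEMMAS AND PROOFS =====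

-- proof-side: the visible (cleaned, non-comment) lines with their indices, as one recursion
def pvVis : List String → Int → List (Int × String)
  | [], _ => []
  | l :: rest, i =>
    let c := pvCleanLine l
    if PySem.Str.startswith c "#" then pvVis rest (i + 1)
    else (i, c) :: pvVis rest (i + 1)

-- the two cleanup helpers are the same function
theorem pvCleanB_eq : pvCleanB = pvCleanLine := rfl

-- A's while loop is findIdx? of the "jobs:" predicate
theorem pvJobsIdx_eq (ls : List String) : ∀ (i : Nat),
    pvJobsIdx ls i = (ls.findIdx? (fun l => PySem.Str.startswith l "jobs:")).map (· + i) := by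
  induction ls with
  | nil => intro i; simp [pvJobsIdx]
  | cons l rest ih =>
      intro i
      rw [pvJobsIdx, List.findIdx?_cons]
      by_cases h : PySem.Str.startswith l "jobs:" = true
      · rw [if_pos h, if_pos h, Option.map_some]
        simp
      · rw [if_neg h, if_neg h, ih, Option.map_map]
        cases hx : rest.findIdx? (fun l => PySem.Str.startswith l "jobs:") with
        | none => rfl
        | some k =>
            simp only [Option.map_some, Option.some.injEq, Function.comp_apply]
            omega

theorem pvJobsIdx_zero (ls : List String) :
    pvJobsIdx ls 0 = ls.findIdx? (fun l => PySem.Str.startswith l "jobs:") := by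
  rw [pvJobsIdx_eq]
  cases hx : ls.findIdx? (fun l => PySem.Str.startswith l "jobs:") <;> simp

-- B's enumerate/map/filter pipeline computes pvVis
theorem pvVis_pipeline (ls : List String) : ∀ (s : Int),
    ((PySem.List.enumerate ls s).map (fun p => (p.1, pvCleanB p.2))).filter
      (fun p => !PySem.Str.startswith p.2 "#") = pvVis ls s := by
  induction ls with
  | nil => intro s; rfl
  | cons l rest ih =>
      intro s
      rw [PySem.List.enumerate_cons, List.map_cons, List.filter_cons, pvCleanB_eq]
      cases h : PySem.Str.startswith (pvCleanLine l) "#" with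
      | true =>
          simp only [pvVis, h, Bool.not_true, Bool.false_eq_true, if_false, if_true]
          exact ih (s + 1)
      | false =>
          simp only [pvVis, h, Bool.not_false, Bool.false_eq_true, if_false, if_true]
          exact congrArg (List.cons (s, pvCleanLine l)) (ih (s + 1))

-- dropping an enumerate is enumerating the drop
theorem enumerate_drop (ls : List String) : ∀ (s : Int) (j : Nat),
    (PySem.List.enumerate ls s).drop j = PySem.List.enumerate (ls.drop j) (s + j) := by
  induction ls with
  | nil => intro s j; simp [PySem.List.enumerate_nil]
  | cons l rest ih =>
      intro s j
      cases j with
      | zero => simp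
      | succ j' =>
          rw [PySem.List.enumerate_cons]
          simp only [List.drop_succ_cons, ih (s + 1) j']
          congr 1
          push_cast
          ring

-- A's countdown loop equals B's index-and-test on the collected uses list,
-- via an invariant over the visible lines (found = whether the job header has passed)
set_option maxHeartbeats 1000000 in
theorem pvLoopA_eq (job act : String) (ls : List String) : ∀ (i : Int) (n : Int),
    (pvLoopA ls i false n job act =
      pvPickB (((pvVis ls i).drop ((pvVis ls i).findIdx
          (fun p => PySem.Str.startswith p.2 (job ++ ":")) + 1)).filter
        (fun p => PySem.Str.startswith p.2 "uses:" || PySem.Str.startswith p.2 "uses :")) n act)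
    ∧ (pvLoopA ls i true n job act =
      pvPickB ((pvVis ls i).filter
        (fun p => PySem.Str.startswith p.2 "uses:" || PySem.Str.startswith p.2 "uses :")) n act) := by
  induction ls with
  | nil =>
      intro i n
      refine ⟨?_, ?_⟩ <;>
        · show (0 : Int) = pvPickB [] n act
          rw [pvPickB, if_neg (by push_cast [List.length_nil]; omega)]
  | cons l rest ih =>
      intro i n
      constructor
      · rw [pvLoopA]
        show _ = pvPickB (((pvVis (l :: rest) i).drop _).filter _) n act
        rw [pvVis]
        cases hc : PySem.Str.startswith (pvCleanLine l) "#" with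
        | true => simp only [if_true, (ih (i+1) n).1]
        | false =>
            simp only [Bool.false_eq_true, if_false, Bool.not_false, if_true, List.findIdx_cons]
            cases hj : PySem.Str.startswith (pvCleanLine l) (job ++ ":") with
            | true =>
                simp only [cond_true, Nat.zero_add, List.drop_succ_cons, List.drop_zero, if_true,
                  (ih (i+1) n).2]
            | false =>
                simp only [cond_false, List.drop_succ_cons, Bool.false_eq_true, if_false,
                  (ih (i+1) n).1]
      · rw [pvLoopA]
        show _ = pvPickB ((pvVis (l :: rest) i).filter _) n act
        rw [pvVis]
        cases hc : PySem.Str.startswith (pvCleanLine l) "#" with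
        | true => simp only [if_true, (ih (i+1) n).2]
        | false =>
            simp only [Bool.false_eq_true, if_false, Bool.not_true, List.filter_cons]
            cases hu : (PySem.Str.startswith (pvCleanLine l) "uses:"
                || PySem.Str.startswith (pvCleanLine l) "uses :") with
            | false => simp only [Bool.false_eq_true, if_false, (ih (i+1) n).2]
            | true =>
                simp only [if_true]
                have hlen : (((i, pvCleanLine l) :: (pvVis rest (i+1)).filter
                    (fun p => PySem.Str.startswith p.2 "uses:"
                      || PySem.Str.startswith p.2 "uses :")).length : Int)
                    = ((pvVis rest (i+1)).filter
                    (fun p => PySem.Str.startswith p.2 "uses:"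
                      || PySem.Str.startswith p.2 "uses :")).length + 1 := by
                  push_cast [List.length_cons]; ring
                by_cases h1 : n = 1
                · subst h1
                  have hcnd : 1 ≤ (1:Int) ∧ (1:Int) ≤ (((i, pvCleanLine l) ::
                      (pvVis rest (i+1)).filter (fun p => PySem.Str.startswith p.2 "uses:"
                        || PySem.Str.startswith p.2 "uses :")).length : Int) :=
                    ⟨le_refl 1, by omega⟩
                  by_cases ha : PySem.Str.isIn act (pvCleanLine l) = true
                  · rw [if_pos ⟨rfl, ha⟩, pvPickB, if_pos hcnd]
                    show _ = if PySem.Str.isIn act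
                        (((i, pvCleanLine l) :: _).getD ((1:Int) - 1).toNat (0, "")).2 = true
                      then _ + 1 else 0
                    rw [show ((1:Int) - 1).toNat = 0 from rfl, List.getD_cons_zero, if_pos ha]
                  · rw [if_neg (fun h => ha h.2), (ih (i+1) ((1:Int)-1)).2, pvPickB, pvPickB,
                      if_neg (show ¬(1 ≤ (1:Int) - 1 ∧ _) by omega), if_pos hcnd]
                    show (0 : Int) = if PySem.Str.isIn act
                        (((i, pvCleanLine l) :: _).getD ((1:Int) - 1).toNat (0, "")).2 = true
                      then _ + 1 else 0
                    rw [show ((1:Int) - 1).toNat = 0 from rfl, List.getD_cons_zero, if_neg ha]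
                · rw [if_neg (fun h => h1 h.1), (ih (i+1) (n-1)).2]
                  rw [pvPickB, pvPickB]
                  by_cases hb : 1 ≤ n - 1 ∧ n - 1 ≤ (((pvVis rest (i+1)).filter
                      (fun p => PySem.Str.startswith p.2 "uses:"
                        || PySem.Str.startswith p.2 "uses :")).length : Int)
                  · rw [if_pos hb, if_pos (show 1 ≤ n ∧ n ≤ (((i, pvCleanLine l) ::
                        (pvVis rest (i+1)).filter (fun p => PySem.Str.startswith p.2 "uses:"
                          || PySem.Str.startswith p.2 "uses :")).length : Int) by omega)]
                    have ht : (n - 1).toNat = (n - 1 - 1).toNat + 1 := by omega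
                    rw [ht, List.getD_cons_succ]
                  · rw [if_neg hb, if_neg (show ¬(1 ≤ n ∧ n ≤ (((i, pvCleanLine l) ::
                        (pvVis rest (i+1)).filter (fun p => PySem.Str.startswith p.2 "uses:"
                          || PySem.Str.startswith p.2 "uses :")).length : Int)) by
                      intro hcon; exact hb ⟨by omega, by omega⟩)]

-- ===== VERDICT (by name: the statement is the Claim_ definition above) =====
set_option maxHeartbeats 1000000 in
theorem find_uses_line_number_spec : Claim_equal_find_uses_line_number := by
  intro yaml job_id uses_num action_name _ _
  unfold Spec_find_uses_line_number find_uses_line_number find_uses_line_number_alt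
  simp only [pvSplitLines, pvJobsIdx_zero]
  cases h : ((PySem.Str.split? yaml "\n").getD []).findIdx?
      (fun l => PySem.Str.startswith l "jobs:") with
  | none => rfl
  | some j =>
      simp only [← List.map_drop, enumerate_drop, zero_add, pvVis_pipeline,
        (pvLoopA_eq job_id action_name _ _ _).1]
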